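-- pv_equiv track=rewrite | github.com/Koki-Doi/FPGA_GuitarEffecter | audio_lab_pynq/AudioCodec.py | diff_register_snapshots
-- ===== SOURCE A (Python) =====
-- import collections
--
-- def diff_register_snapshots(before, after):
--     keys = list(before.keys())
--     for k in after.keys():
--         if k not in keys:
--             keys.append(k)
--     diffs = collections.OrderedDict()
--     for name in keys:
--         b = before.get(name)
--         a = after.get(name)
--         if b != a:
--             diffs[name] = (b, a)
--     return diffs
-- ===== SOURCE B (Python) =====
-- import collections
--
-- def diff_register_snapshots(before, after):
--     diffs = collections.OrderedDict()
--     for name, b in before.items():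
--         a = after.get(name)
--         if b != a:
--             diffs[name] = (b, a)
--     for name, a in after.items():
--         if name not in before:
--             diffs[name] = (None, a)
--     return diffs
-- ===== Notes on version B (the rewrite author's own statement) =====
-- stated objective: faster
-- what changed: B drops A's combined-keys list (built with linear 'k not in keys' scans) and the per-key before.get lookups: it traverses before.items() comparing each value with after.get(name), then traverses after.items() recording after-only names via an O(1) dict membership test.
import Mathlib
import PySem

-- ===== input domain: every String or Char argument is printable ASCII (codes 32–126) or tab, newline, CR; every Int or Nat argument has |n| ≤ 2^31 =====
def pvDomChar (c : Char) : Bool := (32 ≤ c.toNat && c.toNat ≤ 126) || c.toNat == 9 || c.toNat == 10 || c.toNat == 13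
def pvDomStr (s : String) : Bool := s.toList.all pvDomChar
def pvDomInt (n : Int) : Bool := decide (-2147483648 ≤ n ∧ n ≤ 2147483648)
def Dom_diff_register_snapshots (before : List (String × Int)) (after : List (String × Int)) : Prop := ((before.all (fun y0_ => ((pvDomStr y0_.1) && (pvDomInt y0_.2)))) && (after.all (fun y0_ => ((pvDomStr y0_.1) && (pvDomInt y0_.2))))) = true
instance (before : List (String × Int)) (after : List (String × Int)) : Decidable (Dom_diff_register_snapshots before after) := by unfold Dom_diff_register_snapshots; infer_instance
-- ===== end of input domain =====

-- B drops A's combined-keys list (with its linear `not in keys` scans) and traverses each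
-- dict's own items directly: one pass over before's items, then one over after-only items.


-- ===== PORT A =====
def diff_register_snapshots (before : List (String × Int)) (after : List (String × Int)) : List (String × Option Int × Option Int) :=
  let db := PySem.Dict.ofList before
  let da := PySem.Dict.ofList after
  -- keys = list(before.keys()); for k in after.keys(): if k not in keys: keys.append(k)
  let keys := da.keys.foldl (fun ks k => if k ∈ ks then ks else ks ++ [k]) db.keys
  -- diffs = OrderedDict(); for name in keys: b = before.get(name); a = after.get(name); if b != a: diffs[name] = (b, a)
  let diffs := keys.foldl (fun (d : PySem.Dict String (Option Int × Option Int)) name =>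
      let b := db.get? name
      let a := da.get? name
      if b ≠ a then d.insert name (b, a) else d) PySem.Dict.empty
  diffs.items

-- ===== PORT B =====
def diff_register_snapshots_alt (before : List (String × Int)) (after : List (String × Int)) : List (String × Option Int × Option Int) :=
  let db := PySem.Dict.ofList before
  let da := PySem.Dict.ofList after
  -- for name, b in before.items(): a = after.get(name); if b != a: diffs[name] = (b, a)
  let d1 := db.items.foldl (fun (d : PySem.Dict String (Option Int × Option Int)) p =>
      let a := da.get? p.1
      if (some p.2 : Option Int) ≠ a then d.insert p.1 (some p.2, a) else d) PySem.Dict.empty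
  -- for name, a in after.items(): if name not in before: diffs[name] = (None, a)
  let d2 := da.items.foldl (fun (d : PySem.Dict String (Option Int × Option Int)) p =>
      if ¬ db.contains p.1 then d.insert p.1 (none, some p.2) else d) d1
  d2.items

-- ===== PRECONDITION & SPEC =====
def Spec_diff_register_snapshots (before : List (String × Int)) (after : List (String × Int)) (out : List (String × Option Int × Option Int)) : Prop := out = diff_register_snapshots_alt before after
instance (before : List (String × Int)) (after : List (String × Int)) (out : List (String × Option Int × Option Int)) : Decidable (Spec_diff_register_snapshots before after out) := by unfold Spec_diff_register_snapshots; infer_instance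

-- ===== CLAIM (what is proved, stated in full; the proofs are below) =====
def Claim_equal_diff_register_snapshots : Prop := ∀ (before : List (String × Int)) (after : List (String × Int)), Dom_diff_register_snapshots before after → Spec_diff_register_snapshots before after (diff_register_snapshots before after)

-- ===== LEMMAS AND PROOFS =====

-- a guarded insert-loop whose inserted keys are fresh and distinct appends its filtered entries
theorem foldl_if_insert_items {α β : Type} (c : α → Prop) [DecidablePred c] (k : α → String) (v : α → β)
    (l : List α) (d : PySem.Dict String β)
    (hfresh : ∀ a ∈ l, c a → d.contains (k a) = false)
    (hnd : ((l.filter (fun a => decide (c a))).map k).Nodup) :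
    (l.foldl (fun d a => if c a then d.insert (k a) (v a) else d) d).items
      = d.items ++ (l.filter (fun a => decide (c a))).map (fun a => (k a, v a)) := by
  induction l generalizing d with
  | nil => simp
  | cons x l ih =>
    by_cases hc : c x
    · have hx : d.contains (k x) = false := hfresh x (List.mem_cons_self) hc
      have hcons : ((x :: l).filter (fun a => decide (c a))).map k
          = k x :: (l.filter (fun a => decide (c a))).map k := by
        simp [hc]
      have hnd2 : (k x :: (l.filter (fun a => decide (c a))).map k).Nodup := hcons ▸ hnd
      have hnd' : ((l.filter (fun a => decide (c a))).map k).Nodup := (List.nodup_cons.mp hnd2).2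
      have hkx : k x ∉ (l.filter (fun a => decide (c a))).map k := (List.nodup_cons.mp hnd2).1
      have hfresh' : ∀ a ∈ l, c a → (d.insert (k x) (v x)).contains (k a) = false := by
        intro a ha hca
        rw [PySem.Dict.contains_insert]
        have h1 : (k a == k x) = false := by
          have : k a ∈ (l.filter (fun a => decide (c a))).map k :=
            List.mem_map_of_mem (List.mem_filter.mpr ⟨ha, by simpa using hca⟩)
          simp only [beq_eq_false_iff_ne, ne_eq]
          intro h; exact hkx (h ▸ this)
        rw [h1, hfresh a (List.mem_cons_of_mem _ ha) hca]
        rfl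
      calc ((x :: l).foldl (fun d a => if c a then d.insert (k a) (v a) else d) d).items
          = (l.foldl (fun d a => if c a then d.insert (k a) (v a) else d)
              (d.insert (k x) (v x))).items := by simp [hc]
        _ = (d.insert (k x) (v x)).items
              ++ (l.filter (fun a => decide (c a))).map (fun a => (k a, v a)) :=
            ih (d.insert (k x) (v x)) hfresh' hnd'
        _ = d.items ++ ((x :: l).filter (fun a => decide (c a))).map (fun a => (k a, v a)) := by
            rw [PySem.Dict.items_insert_of_not_contains _ _ hx]
            simp [hc]
    · have hnd' : ((l.filter (fun a => decide (c a))).map k).Nodup := by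
        simpa [List.filter_cons, hc] using hnd
      have : ((x :: l).foldl (fun d a => if c a then d.insert (k a) (v a) else d) d)
          = l.foldl (fun d a => if c a then d.insert (k a) (v a) else d) d := by
        simp [hc]
      rw [this, ih d (fun a ha hca => hfresh a (List.mem_cons_of_mem _ ha) hca) hnd']
      simp [hc]

-- A's key-union loop appends exactly the new keys (for a duplicate-free second list)
theorem keys_union_eq (ka : List String) (kb : List String) (h : ka.Nodup) :
    ka.foldl (fun ks k => if k ∈ ks then ks else ks ++ [k]) kb
      = kb ++ ka.filter (fun k => decide (k ∉ kb)) := by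
  induction ka generalizing kb with
  | nil => simp
  | cons x ka ih =>
    have hx : x ∉ ka := (List.nodup_cons.mp h).1
    by_cases hm : x ∈ kb
    · simp only [List.foldl_cons, if_pos hm]
      rw [ih kb (List.nodup_cons.mp h).2]
      simp [hm]
    · simp only [List.foldl_cons, if_neg hm]
      rw [ih (kb ++ [x]) (List.nodup_cons.mp h).2]
      have hfe : ka.filter (fun k => decide (k ∉ kb ++ [x]))
          = ka.filter (fun k => decide (k ∉ kb)) := by
        apply List.filter_congr
        intro a ha
        have : a ≠ x := fun he => hx (he ▸ ha)
        simp [List.mem_append, this]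
      rw [hfe]
      simp [hm, List.append_assoc]

-- the before-keys pass of A computes the same entries as B's pass over before's items
theorem piece_before (db da : PySem.Dict String Int) (hdbn : db.keys.Nodup) :
    (db.keys.filter (fun n => decide (db.get? n ≠ da.get? n))).map
        (fun n => (n, db.get? n, da.get? n))
      = (db.items.filter (fun p => decide ((some p.2 : Option Int) ≠ da.get? p.1))).map
          (fun p => (p.1, some p.2, da.get? p.1)) := by
  have hk : db.keys = db.items.map Prod.fst := rfl
  rw [hk, List.filter_map, List.map_map]
  rw [List.filter_congr (q := fun p => decide ((some p.2 : Option Int) ≠ da.get? p.1))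
    (by
      intro p hp
      have := PySem.Dict.get?_of_mem_items db (k := p.1) (v := p.2) (by simpa using hp) hdbn
      simp [Function.comp, this])]
  apply List.map_congr_left
  intro p hp
  have hpm : p ∈ db.items := (List.mem_filter.mp hp).1
  have := PySem.Dict.get?_of_mem_items db (k := p.1) (v := p.2) (by simpa using hpm) hdbn
  simp [Function.comp, this]

-- the after-only pass of A computes the same entries as B's pass over after's items
theorem piece_after (db da : PySem.Dict String Int) (hdan : da.keys.Nodup) :
    (((da.keys.filter (fun n => decide (n ∉ db.keys))).filter
          (fun n => decide (db.get? n ≠ da.get? n))).map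
        (fun n => (n, db.get? n, da.get? n)))
      = (da.items.filter (fun p => decide (¬ db.contains p.1 = true))).map
          (fun p => ((p.1 : String), (none : Option Int), some p.2)) := by
  have hk : da.keys = da.items.map Prod.fst := rfl
  rw [List.filter_filter, hk, List.filter_map, List.map_map]
  rw [List.filter_congr (q := fun p => decide (¬ db.contains p.1 = true))
    (by
      intro p hp
      have hga := PySem.Dict.get?_of_mem_items da (k := p.1) (v := p.2) (by simpa using hp) hdan
      by_cases hm : p.1 ∈ db.keys
      · simp [Function.comp, hm, PySem.Dict.contains_eq_decide_mem_keys]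
      · have hgb : db.get? p.1 = none := (PySem.Dict.get?_eq_none_iff_not_mem_keys db p.1).mpr hm
        simp [Function.comp, hm, hgb, hga, PySem.Dict.contains_eq_decide_mem_keys])]
  apply List.map_congr_left
  intro p hp
  have hpm : p ∈ da.items := (List.mem_filter.mp hp).1
  have hpc : ¬ db.contains p.1 = true := by simpa using (List.mem_filter.mp hp).2
  have hm : p.1 ∉ db.keys := by
    simpa [PySem.Dict.contains_eq_decide_mem_keys] using hpc
  have hgb : db.get? p.1 = none := (PySem.Dict.get?_eq_none_iff_not_mem_keys db p.1).mpr hm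
  have hga := PySem.Dict.get?_of_mem_items da (k := p.1) (v := p.2) (by simpa using hpm) hdan
  simp [Function.comp, hgb, hga]

-- ===== VERDICT (by name: the statement is the Claim_ definition above) =====
theorem diff_register_snapshots_spec : Claim_equal_diff_register_snapshots := by
  intro before after _
  unfold Spec_diff_register_snapshots
  simp only [diff_register_snapshots, diff_register_snapshots_alt]
  have hdbn : (PySem.Dict.ofList before).keys.Nodup := PySem.Dict.nodup_keys_ofList before
  have hdan : (PySem.Dict.ofList after).keys.Nodup := PySem.Dict.nodup_keys_ofList after
  rw [keys_union_eq _ _ hdan]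
  -- the three guarded insert-loops append their filtered entries
  rw [foldl_if_insert_items
        (fun n => (PySem.Dict.ofList before).get? n ≠ (PySem.Dict.ofList after).get? n)
        (fun n => n)
        (fun n => ((PySem.Dict.ofList before).get? n, (PySem.Dict.ofList after).get? n))
        _ _ (fun a _ _ => PySem.Dict.contains_empty a)
        (by
          simp only [List.map_id_fun', id]
          refine List.Nodup.filter _ (List.Nodup.append hdbn (hdan.filter _) ?_)
          intro a ha hb
          have := (List.mem_filter.mp hb).2
          simp at this
          exact this ha)]
  rw [foldl_if_insert_items
        (fun p => ¬ (PySem.Dict.ofList before).contains p.1 = true)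
        Prod.fst
        (fun p => ((none : Option Int), some p.2))
        _ _ ?_
        ((hdan.sublist (List.Sublist.map Prod.fst (List.filter_sublist))))]
  rw [foldl_if_insert_items
        (fun p => (some p.2 : Option Int) ≠ (PySem.Dict.ofList after).get? p.1)
        Prod.fst
        (fun p => ((some p.2 : Option Int), (PySem.Dict.ofList after).get? p.1))
        _ _ (fun a _ _ => PySem.Dict.contains_empty a.1)
        ((hdbn.sublist (List.Sublist.map Prod.fst (List.filter_sublist))))]
  · simp only [List.filter_append, List.map_append, List.append_assoc]
    rw [piece_before _ _ hdbn, piece_after _ _ hdan]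
  · -- after-only keys are fresh for the dict built from before's items
    intro p hp hc
    have hm : p.1 ∉ (PySem.Dict.ofList before).keys := by
      simpa [PySem.Dict.contains_eq_decide_mem_keys] using hc
    rw [PySem.Dict.contains_eq_decide_mem_keys]
    simp only [decide_eq_false_iff_not]
    intro hmem
    have hkeys : (List.foldl
        (fun d p => if (some p.2 : Option Int) ≠ (PySem.Dict.ofList after).get? p.1
          then d.insert p.1 ((some p.2 : Option Int), (PySem.Dict.ofList after).get? p.1) else d)
        PySem.Dict.empty (PySem.Dict.ofList before).items).items
        = PySem.Dict.empty.items ++ ((PySem.Dict.ofList before).items.filter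
            (fun p => decide ((some p.2 : Option Int) ≠ (PySem.Dict.ofList after).get? p.1))).map
          (fun p => (p.1, (some p.2 : Option Int), (PySem.Dict.ofList after).get? p.1)) :=
      foldl_if_insert_items _ Prod.fst _ _ _ (fun a _ _ => PySem.Dict.contains_empty a.1)
        ((hdbn.sublist (List.Sublist.map Prod.fst (List.filter_sublist))))
    have : p.1 ∈ (PySem.Dict.ofList before).keys := by
      have hmem' := hmem
      rw [show ((List.foldl _ PySem.Dict.empty (PySem.Dict.ofList before).items).keys : List String)
          = _ from congrArg (List.map Prod.fst) hkeys] at hmem'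
      simp only [show (PySem.Dict.empty : PySem.Dict String (Option Int × Option Int)).items = [] from rfl,
        List.nil_append, List.map_map] at hmem'
      obtain ⟨q, hq, hq1⟩ := List.mem_map.mp hmem'
      have hqi : q ∈ (PySem.Dict.ofList before).items := (List.mem_filter.mp hq).1
      have hq1' : q.1 = p.1 := hq1
      exact hq1' ▸ List.mem_map_of_mem hqi
    exact hm this
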